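-- pv_equiv track=rewrite | github.com/qcs4tracy/NER-Project | crf_ner/template.py | get_da
-- ===== SOURCE A (Python) =====
-- def get_da(token):
--     bd = False
--     ba = False
--     for c in token:
--         if c.isdigit():
--             bd = True
--         elif c.isalpha():
--             ba = True
--         else:
--             return False
--     return bd and ba
-- ===== SOURCE B (Python) =====
-- def get_da(token):
--     nd = sum(1 for c in token if c.isdigit())
--     na = sum(1 for c in token if c.isalpha())
--     return nd + na == len(token) and nd > 0 and na > 0
-- ===== Notes on version B (the rewrite author's own statement) =====
-- stated objective: alternative
-- what changed: Replaces the flag-accumulating early-return loop by a counting formulation: count digit chars and alpha chars and decide arithmetically (nd + na == len(token) and nd > 0 and na > 0), correct because isdigit and isalpha are disjoint so the counts sum to the length exactly when every char is alphanumeric.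
import Mathlib
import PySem

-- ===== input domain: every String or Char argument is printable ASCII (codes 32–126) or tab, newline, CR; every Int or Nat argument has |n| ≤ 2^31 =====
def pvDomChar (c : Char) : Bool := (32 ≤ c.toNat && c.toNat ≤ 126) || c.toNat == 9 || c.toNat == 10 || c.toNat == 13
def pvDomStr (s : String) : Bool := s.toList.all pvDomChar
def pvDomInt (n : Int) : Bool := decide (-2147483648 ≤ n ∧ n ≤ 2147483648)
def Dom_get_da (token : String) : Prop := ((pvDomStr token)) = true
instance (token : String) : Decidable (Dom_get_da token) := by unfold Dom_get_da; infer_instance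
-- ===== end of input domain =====

-- B replaces A's flag-accumulating early-return loop by a counting formulation (digit count + alpha count compared to the length); objective: alternative.


-- ===== PORT A =====
-- loop over the characters carrying the two flags; returning false mid-loop models A's early `return False`
def get_da_loop : List Char → Bool → Bool → Bool
  | [], bd, ba => bd && ba
  | c :: cs, bd, ba =>
    if PySem.Chars.isdigit c then get_da_loop cs true ba
    else if PySem.Chars.isalpha c then get_da_loop cs bd true
    else false

def get_da (token : String) : Bool := get_da_loop token.toList false false

-- ===== PORT B =====
-- count digit chars and alpha chars, then decide arithmetically
def get_da_alt (token : String) : Bool :=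
  let nd := token.toList.countP (fun c => PySem.Chars.isdigit c)
  let na := token.toList.countP (fun c => PySem.Chars.isalpha c)
  decide (nd + na = token.toList.length ∧ 0 < nd ∧ 0 < na)

-- ===== PRECONDITION & SPEC =====
def Spec_get_da (token : String) (out : Bool) : Prop := out = get_da_alt token
instance (token : String) (out : Bool) : Decidable (Spec_get_da token out) := by unfold Spec_get_da; infer_instance

-- ===== CLAIM (what is proved, stated in full; the proofs are below) =====
def Claim_equal_get_da : Prop := ∀ (token : String), Dom_get_da token → Spec_get_da token (get_da token)

-- ===== LEMMAS AND PROOFS =====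

-- a digit character is never an alpha character (A's elif never fires after the digit branch)
theorem digit_not_alpha (c : Char) (h : PySem.Chars.isdigit c = true) :
    PySem.Chars.isalpha c = false := by
  simp only [PySem.Chars.isdigit, PySem.Chars.isalpha, PySem.Chars.isupper, PySem.Chars.islower,
    Bool.and_eq_true, Bool.or_eq_false_iff, Bool.and_eq_false_iff, decide_eq_true_eq,
    decide_eq_false_iff_not, Char.le_def, UInt32.le_iff_toNat_le,
    show ('0' : Char).val.toNat = 48 from rfl, show ('9' : Char).val.toNat = 57 from rfl,
    show ('A' : Char).val.toNat = 65 from rfl, show ('Z' : Char).val.toNat = 90 from rfl,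
    show ('a' : Char).val.toNat = 97 from rfl, show ('z' : Char).val.toNat = 122 from rfl] at *
  omega

-- invariant of A's loop: if every character is digit-or-alpha the loop returns the flags or-ed
-- with the two any-scans, otherwise it returns false
theorem get_da_loop_eq (cs : List Char) : ∀ (bd ba : Bool),
    get_da_loop cs bd ba =
      if cs.all (fun c => PySem.Chars.isdigit c || PySem.Chars.isalpha c) then
        (bd || cs.any (fun c => PySem.Chars.isdigit c)) &&
        (ba || cs.any (fun c => PySem.Chars.isalpha c))
      else false := by
  induction cs with
  | nil => simp [get_da_loop]
  | cons c cs ih =>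
    intro bd ba
    by_cases hd : PySem.Chars.isdigit c
    · simp [get_da_loop, hd, ih, digit_not_alpha c hd]
    · by_cases ha : PySem.Chars.isalpha c
      · simp [get_da_loop, hd, ha, ih]
      · simp [get_da_loop, hd, ha]

-- counts of two disjoint predicates add up to the count of their disjunction
theorem countP_or_disjoint (cs : List Char) :
    cs.countP (fun c => PySem.Chars.isdigit c || PySem.Chars.isalpha c) =
      cs.countP (fun c => PySem.Chars.isdigit c) + cs.countP (fun c => PySem.Chars.isalpha c) := by
  induction cs with
  | nil => simp
  | cons c cs ih =>
    by_cases hd : PySem.Chars.isdigit c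
    · simp [List.countP_cons, hd, digit_not_alpha c hd, ih]; omega
    · by_cases ha : PySem.Chars.isalpha c
      · simp [List.countP_cons, hd, ha, ih]; omega
      · simp [List.countP_cons, hd, ha, ih]

-- ===== VERDICT (by name: the statement is the Claim_ definition above) =====
theorem get_da_spec : Claim_equal_get_da := by
  intro token _
  unfold Spec_get_da get_da get_da_alt
  rw [get_da_loop_eq]
  by_cases h : token.toList.all (fun c => PySem.Chars.isdigit c || PySem.Chars.isalpha c)
  · have hlen : token.toList.countP (fun c => PySem.Chars.isdigit c) +
        token.toList.countP (fun c => PySem.Chars.isalpha c) = token.toList.length := by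
      rw [← countP_or_disjoint]
      exact List.countP_eq_length.mpr (by simpa [List.all_eq_true] using h)
    rw [if_pos h]
    simp only [Bool.false_or]
    rw [Bool.eq_iff_iff]
    simp [hlen, List.countP_pos_iff, List.any_eq_true]
  · have hne : token.toList.countP (fun c => PySem.Chars.isdigit c) +
        token.toList.countP (fun c => PySem.Chars.isalpha c) ≠ token.toList.length := by
      rw [← countP_or_disjoint]
      intro he
      exact h (by simpa [List.all_eq_true] using List.countP_eq_length.mp he)
    rw [if_neg h]
    rw [eq_comm, decide_eq_false_iff_not]
    rintro ⟨he, -⟩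
    exact hne he
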